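-- pv_equiv track=rewrite | github.com/juanshishido/codewars | kyu7/total_licks.py | total_licks
-- ===== SOURCE A (Python) =====
-- def total_licks(env):
--     baseline = 252
--     for licks in env.values():
--         baseline += licks
--     s_licks = 'It took %s licks to get to the tootsie roll center of a tootsie pop.' % baseline
--     if len(env) > 0:
--         max_licks = max(env.values())
--         if max_licks > 0:
--             challenging_condition = [k for k, v in env.items() if v == max_licks]
--             s_challenge = 'The toughest challenge was %s.' % challenging_condition[0]
--             return s_licks + ' ' + s_challenge
--     return s_licks
-- ===== SOURCE B (Python) =====
-- def total_licks(env):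
--     total = 252
--     best = None  # (key, value); first key with the maximal value wins (strict >)
--     for k, v in env.items():
--         total += v
--         if best is None or v > best[1]:
--             best = (k, v)
--     s = 'It took %s licks to get to the tootsie roll center of a tootsie pop.' % total
--     if best is not None and best[1] > 0:
--         s += ' The toughest challenge was %s.' % best[0]
--     return s
-- ===== Notes on version B (the rewrite author's own statement) =====
-- stated objective: simpler
-- what changed: One combined pass accumulates the total and tracks the (first) max key/value pair, replacing A's separate sum loop, max() over values, and list comprehension + indexing.
import Mathlib
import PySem

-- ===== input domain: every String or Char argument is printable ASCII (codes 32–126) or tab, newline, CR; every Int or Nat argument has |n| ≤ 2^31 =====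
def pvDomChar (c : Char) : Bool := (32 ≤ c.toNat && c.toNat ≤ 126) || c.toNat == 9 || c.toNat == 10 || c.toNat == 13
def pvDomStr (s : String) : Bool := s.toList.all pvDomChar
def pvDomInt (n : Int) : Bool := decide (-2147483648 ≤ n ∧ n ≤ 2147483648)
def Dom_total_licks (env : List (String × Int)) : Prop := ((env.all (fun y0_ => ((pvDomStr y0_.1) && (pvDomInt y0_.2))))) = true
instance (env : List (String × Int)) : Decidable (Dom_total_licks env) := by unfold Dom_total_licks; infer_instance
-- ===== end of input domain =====

-- B merges A's sum loop, max() and comprehension into one pass tracking the running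
-- total and the first maximal (key, value) pair; same return value, simpler shape.

-- ===== PORT A =====
def total_licks (env : List (String × Int)) : String :=
  let baseline : Int := env.foldl (fun b p => b + p.2) 252
  let s_licks : String :=
    "It took " ++ PySem.Int.toStr baseline ++ " licks to get to the tootsie roll center of a tootsie pop."
  if env.length > 0 then
    match PySem.List.max? (env.map Prod.snd) (fun y => y) with
    | some max_licks =>
        if max_licks > 0 then
          let challenging_condition := (env.filter (fun p => p.2 == max_licks)).map Prod.fst
          match PySem.List.pyGet? challenging_condition 0 with
          | some k =>
              let s_challenge := "The toughest challenge was " ++ k ++ "."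
              s_licks ++ " " ++ s_challenge
          | none => s_licks   -- unreachable: the max value occurs in env
        else s_licks
    | none => s_licks         -- unreachable: env is nonempty here
  else s_licks

-- ===== PORT B =====
def total_licks_alt (env : List (String × Int)) : String :=
  let st : Int × Option (String × Int) :=
    env.foldl (fun acc p =>
      (acc.1 + p.2,
       match acc.2 with
       | none => some p
       | some b => if p.2 > b.2 then some p else some b))
      (252, none)
  let s : String :=
    "It took " ++ PySem.Int.toStr st.1 ++ " licks to get to the tootsie roll center of a tootsie pop."
  match st.2 with
  | some b => if b.2 > 0 then s ++ (" The toughest challenge was " ++ b.1 ++ ".") else s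
  | none => s

-- ===== PRECONDITION & SPEC =====
def Spec_total_licks (env : List (String × Int)) (out : String) : Prop := out = total_licks_alt env
instance (env : List (String × Int)) (out : String) : Decidable (Spec_total_licks env out) := by unfold Spec_total_licks; infer_instance

-- ===== CLAIM (what is proved, stated in full; the proofs are below) =====
def Claim_equal_total_licks : Prop := ∀ (env : List (String × Int)), Dom_total_licks env → Spec_total_licks env (total_licks env)

-- ===== LEMMAS AND PROOFS =====

-- B's single fold splits into the sum fold and the best-pair fold.
def pvG (b p : String × Int) : String × Int := if p.2 > b.2 then p else b

theorem pv_fold_split (env : List (String × Int)) (a : Int) (o : Option (String × Int)) :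
    env.foldl (fun acc p =>
      (acc.1 + p.2,
       match acc.2 with
       | none => some p
       | some b => if p.2 > b.2 then some p else some b))
      (a, o)
    = (env.foldl (fun b p => b + p.2) a,
       env.foldl (fun ob p =>
         match ob with
         | none => some p
         | some b => if p.2 > b.2 then some p else some b) o) := by
  induction env generalizing a o with
  | nil => rfl
  | cons q t ih => simpa using ih (a + q.2) _

theorem pv_best_cons (t : List (String × Int)) (b : String × Int) :
    t.foldl (fun ob p =>
      match ob with
      | none => some p
      | some b => if p.2 > b.2 then some p else some b) (some b)
    = some (t.foldl pvG b) := by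
  induction t generalizing b with
  | nil => rfl
  | cons q t ih =>
    simp only [List.foldl_cons]
    rw [← ih (pvG b q)]
    unfold pvG
    split <;> rfl

-- The best-pair fold carries the running max and the first pair attaining it.
theorem pv_best_spec (t : List (String × Int)) (b : String × Int) :
    (t.foldl pvG b).2 = t.foldl (fun a q => max a q.2) b.2
    ∧ b.2 ≤ (t.foldl pvG b).2
    ∧ (b :: t).find? (fun p => p.2 == (t.foldl pvG b).2) = some (t.foldl pvG b) := by
  induction t generalizing b with
  | nil => simp
  | cons q t ih =>
    obtain ⟨hmax, hle, hfind⟩ := ih (pvG b q)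
    refine ⟨?_, ?_, ?_⟩
    · simp only [List.foldl_cons]
      rw [hmax]
      have h2 : (pvG b q).2 = max b.2 q.2 := by unfold pvG; split <;> omega
      rw [h2]
    · have : b.2 ≤ (pvG b q).2 := by unfold pvG; split <;> omega
      simp only [List.foldl_cons]; omega
    · simp only [List.foldl_cons]
      by_cases h : q.2 > b.2
      · -- pvG b q = q ; b is strictly below the max, so find? skips b
        have hg : pvG b q = q := by simp [pvG, h]
        rw [hg] at hfind hle ⊢
        have hb : ¬ (b.2 = (t.foldl pvG q).2) := by omega
        rw [List.find?_cons_of_neg (by simpa using hb)]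
        exact hfind
      · have hg : pvG b q = b := by simp [pvG, h]
        rw [hg] at hfind hle ⊢
        by_cases hb : b.2 = (t.foldl pvG b).2
        · have hr : t.foldl pvG b = b := by
            rw [List.find?_cons_of_pos (by simpa using hb)] at hfind
            exact (Option.some.inj hfind).symm
          rw [List.find?_cons_of_pos (by simpa using hb), hr]
        · have hq : ¬ (q.2 = (t.foldl pvG b).2) := by omega
          rw [List.find?_cons_of_neg (by simpa using hb),
              List.find?_cons_of_neg (by simpa using hq)]
          rw [List.find?_cons_of_neg (by simpa using hb)] at hfind
          exact hfind

theorem pv_head_filter (p : String × Int → Bool) (l : List (String × Int)) :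
    (l.filter p).head? = l.find? p := by
  induction l with
  | nil => rfl
  | cons q t ih =>
    by_cases h : p q
    · simp [h]
    · simp [h, List.find?_cons_of_neg h, ih]

theorem pv_space_merge (x k : String) :
    x ++ " " ++ ("The toughest challenge was " ++ k ++ ".")
      = x ++ (" The toughest challenge was " ++ k ++ ".") := by
  apply String.ext
  simp [String.toList_append]

-- ===== VERDICT (by name: the statement is the Claim_ definition above) =====
theorem total_licks_spec : Claim_equal_total_licks := by
  intro env _
  unfold Spec_total_licks total_licks total_licks_alt
  cases env with
  | nil => rfl
  | cons b t =>
    dsimp only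
    rw [pv_fold_split]
    simp only [List.foldl_cons]
    rw [pv_best_cons]
    obtain ⟨hmax, _, hfind⟩ := pv_best_spec t b
    have hmax? : PySem.List.max? ((b :: t).map Prod.snd) (fun y => y)
        = some ((t.foldl pvG b).2) := by
      rw [List.map_cons, PySem.List.max?_id_cons, List.foldl_map, hmax]
    simp only [List.length_cons, hmax?] at *
    have hlen : 0 < t.length + 1 := Nat.succ_pos _
    simp only [if_pos hlen]
    by_cases hpos : (t.foldl pvG b).2 > 0
    · simp only [if_pos hpos]
      have hget : PySem.List.pyGet?
          (((b :: t).filter (fun p => p.2 == (t.foldl pvG b).2)).map Prod.fst) 0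
          = some ((t.foldl pvG b).1) := by
        rw [PySem.List.pyGet?_zero]
        rw [← List.head?_eq_getElem?, List.head?_map, pv_head_filter, hfind]
        rfl
      rw [hget]
      exact pv_space_merge _ _
    · simp only [if_neg hpos]
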